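-- pv_equiv track=rewrite | github.com/chris-page-gov/mcp-geo | tools/nomis_data.py | _resolve_gss_geography_type
-- ===== SOURCE A (Python) =====
-- _CENSUS_GSS_PREFIXES_OA = ("E00", "W00")
--
-- _CENSUS_GSS_PREFIXES_LSOA = ("E01", "W01")
--
-- _CENSUS_GSS_PREFIXES_MSOA = ("E02", "W02")
--
-- _CENSUS_GSS_PREFIXES_WARD = ("E05", "W05")
--
-- def _resolve_gss_geography_type(gss_codes: list[str]) -> tuple[int, str] | None:
--     prefixes = {code.upper()[:3] for code in gss_codes if code}
--     if not prefixes: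
--         return None
--     if prefixes.issubset(_CENSUS_GSS_PREFIXES_WARD):
--         return 297, "wards"
--     if prefixes.issubset(_CENSUS_GSS_PREFIXES_OA):
--         return 300, "output areas"
--     if prefixes.issubset(_CENSUS_GSS_PREFIXES_LSOA):
--         return 298, "lsoa"
--     if prefixes.issubset(_CENSUS_GSS_PREFIXES_MSOA):
--         return 299, "msoa"
--     return None
-- ===== SOURCE B (Python) =====
-- _PREFIX_RESULT = {
--     "E05": (297, "wards"), "W05": (297, "wards"),
--     "E00": (300, "output areas"), "W00": (300, "output areas"),
--     "E01": (298, "lsoa"), "W01": (298, "lsoa"),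
--     "E02": (299, "msoa"), "W02": (299, "msoa"),
-- }
--
-- def _resolve_gss_geography_type(gss_codes: list[str]) -> tuple[int, str] | None:
--     result = None
--     for code in gss_codes:
--         if not code:
--             continue
--         r = _PREFIX_RESULT.get(code.upper()[:3])
--         if r is None:
--             return None
--         if result is not None and r != result:
--             return None
--         result = r
--     return result
-- ===== Notes on version B (the rewrite author's own statement) =====
-- stated objective: simpler
-- what changed: Replaced the set-comprehension plus four ordered issubset checks with one prefix-to-result lookup table and a single early-exit uniformity pass over the codes.
import Mathlib
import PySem

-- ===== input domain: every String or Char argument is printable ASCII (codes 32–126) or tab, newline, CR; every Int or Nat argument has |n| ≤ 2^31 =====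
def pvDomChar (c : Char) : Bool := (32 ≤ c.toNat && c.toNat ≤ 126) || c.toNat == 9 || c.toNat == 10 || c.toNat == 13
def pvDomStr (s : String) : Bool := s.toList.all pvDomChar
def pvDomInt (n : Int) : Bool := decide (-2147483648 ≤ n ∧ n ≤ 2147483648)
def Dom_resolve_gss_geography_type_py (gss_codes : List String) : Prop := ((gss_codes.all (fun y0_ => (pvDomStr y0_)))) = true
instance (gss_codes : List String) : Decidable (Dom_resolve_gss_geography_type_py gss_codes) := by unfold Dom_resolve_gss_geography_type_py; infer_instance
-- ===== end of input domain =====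

-- B replaces A's four ordered issubset checks by one prefix→result table and a single
-- uniformity pass over the codes (objective: simpler, one traversal, early exit).

-- ===== PORT A =====
-- code.upper()[:3]
def pvPrefix (code : String) : String :=
  PySem.Str.slice (PySem.Str.upper code) none (some 3)

def resolve_gss_geography_type_py (gss_codes : List String) : Option (Int × String) :=
  let prefixes : PySem.Set String :=
    PySem.Set.ofList ((gss_codes.filter (fun code => code ≠ "")).map pvPrefix)
  if prefixes = [] then none
  else if PySem.Set.issubset prefixes ["E05", "W05"] then some (297, "wards")
  else if PySem.Set.issubset prefixes ["E00", "W00"] then some (300, "output areas")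
  else if PySem.Set.issubset prefixes ["E01", "W01"] then some (298, "lsoa")
  else if PySem.Set.issubset prefixes ["E02", "W02"] then some (299, "msoa")
  else none

-- ===== PORT B =====
def pvTable : PySem.Dict String (Int × String) :=
  PySem.Dict.ofList
  [("E05", (297, "wards")), ("W05", (297, "wards")),
   ("E00", (300, "output areas")), ("W00", (300, "output areas")),
   ("E01", (298, "lsoa")), ("W01", (298, "lsoa")),
   ("E02", (299, "msoa")), ("W02", (299, "msoa"))]

-- the 'for code in gss_codes' loop of Source B; 'result' is the accumulator
def pvAltLoop (codes : List String) (result : Option (Int × String)) : Option (Int × String) :=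
  match codes with
  | [] => result
  | code :: rest =>
    if code = "" then pvAltLoop rest result
    else
      match PySem.Dict.get? pvTable (pvPrefix code) with
      | none => none
      | some r =>
        match result with
        | some prev => if r ≠ prev then none else pvAltLoop rest (some r)
        | none => pvAltLoop rest (some r)

def resolve_gss_geography_type_py_alt (gss_codes : List String) : Option (Int × String) :=
  pvAltLoop gss_codes none

-- ===== PRECONDITION & SPEC =====
def Spec_resolve_gss_geography_type_py (gss_codes : List String) (out : Option (Int × String)) : Prop := out = resolve_gss_geography_type_py_alt gss_codes
instance (gss_codes : List String) (out : Option (Int × String)) : Decidable (Spec_resolve_gss_geography_type_py gss_codes out) := by unfold Spec_resolve_gss_geography_type_py; infer_instance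

-- ===== CLAIM (what is proved, stated in full; the proofs are below) =====
def Claim_equal_resolve_gss_geography_type_py : Prop := ∀ (gss_codes : List String), Dom_resolve_gss_geography_type_py gss_codes → Spec_resolve_gss_geography_type_py gss_codes (resolve_gss_geography_type_py gss_codes)

-- ===== LEMMAS AND PROOFS =====

-- table lookup, spelled out per prefix
theorem pvLookup_eq (p : String) :
    PySem.Dict.get? pvTable p =
      if p = "E05" ∨ p = "W05" then some (297, "wards")
      else if p = "E00" ∨ p = "W00" then some (300, "output areas")
      else if p = "E01" ∨ p = "W01" then some (298, "lsoa")
      else if p = "E02" ∨ p = "W02" then some (299, "msoa")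
      else none := by
  have ht : pvTable = PySem.Dict.mk
      [("E05", (297, "wards")), ("W05", (297, "wards")),
       ("E00", (300, "output areas")), ("W00", (300, "output areas")),
       ("E01", (298, "lsoa")), ("W01", (298, "lsoa")),
       ("E02", (299, "msoa")), ("W02", (299, "msoa"))] := by decide
  rw [ht]
  simp only [PySem.Dict.get?_mk_cons, beq_iff_eq]
  split_ifs <;> subst_vars <;> first | rfl | (rcases ‹_ ∨ _› with rfl | rfl <;> simp_all) | simp_all

-- B's loop over the codes equals the same loop over the nonempty codes' prefixes
def pvPreLoop (ps : List String) (result : Option (Int × String)) : Option (Int × String) :=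
  match ps with
  | [] => result
  | p :: rest =>
    match PySem.Dict.get? pvTable p with
    | none => none
    | some r =>
      match result with
      | some prev => if r ≠ prev then none else pvPreLoop rest (some r)
      | none => pvPreLoop rest (some r)

theorem pvAltLoop_eq (codes : List String) (acc : Option (Int × String)) :
    pvAltLoop codes acc = pvPreLoop ((codes.filter (fun c => c ≠ "")).map pvPrefix) acc := by
  induction codes generalizing acc with
  | nil => rfl
  | cons c rest ih =>
    by_cases hc : c = ""
    · simp [pvAltLoop, hc, ih]
    · rw [pvAltLoop]
      have hf : (c :: rest).filter (fun c => c ≠ "") = c :: rest.filter (fun c => c ≠ "") := by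
        simp [hc]
      rw [if_neg hc, hf, List.map_cons, pvPreLoop]
      cases PySem.Dict.get? pvTable (pvPrefix c) with
      | none => rfl
      | some r => cases acc <;> simp [ih]

theorem pvPreLoop_some (ps : List String) (r : Int × String) :
    pvPreLoop ps (some r) =
      if ∀ p ∈ ps, PySem.Dict.get? pvTable p = some r then some r else none := by
  induction ps with
  | nil => simp [pvPreLoop]
  | cons p rest ih =>
    simp only [pvPreLoop]
    cases hp : PySem.Dict.get? pvTable p with
    | none => simp [hp]
    | some q =>
      by_cases hq : q = r
      · subst hq; simp [hp, ih]
      · simp [hp, hq]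

theorem classify_eq (L : List String) :
    (if PySem.Set.ofList L = [] then none
     else if PySem.Set.issubset (PySem.Set.ofList L) ["E05", "W05"] then some ((297 : Int), "wards")
     else if PySem.Set.issubset (PySem.Set.ofList L) ["E00", "W00"] then some (300, "output areas")
     else if PySem.Set.issubset (PySem.Set.ofList L) ["E01", "W01"] then some (298, "lsoa")
     else if PySem.Set.issubset (PySem.Set.ofList L) ["E02", "W02"] then some (299, "msoa")
     else none) = pvPreLoop L none := by
  cases L with
  | nil => rfl
  | cons p rest =>
    have hne : PySem.Set.ofList (p :: rest) ≠ [] := by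
      intro h
      have hm : p ∈ PySem.Set.ofList (p :: rest) := by
        exact (PySem.Set.mem_ofList _ _).mpr List.mem_cons_self
      rw [h] at hm
      exact (List.not_mem_nil) hm
    have hsub : ∀ (t : List String),
        PySem.Set.issubset (PySem.Set.ofList (p :: rest)) t = true ↔ ∀ x ∈ p :: rest, x ∈ t := by
      intro t
      rw [PySem.Set.issubset_iff]
      constructor
      · intro h x hx; exact h x ((PySem.Set.mem_ofList _ _).mpr hx)
      · intro h x hx; exact h x ((PySem.Set.mem_ofList _ _).mp hx)
    have hfail : ∀ (t : List String), p ∉ t →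
        PySem.Set.issubset (PySem.Set.ofList (p :: rest)) t = false := by
      intro t hpt
      rw [Bool.eq_false_iff]
      intro h
      exact hpt ((hsub t).mp h p List.mem_cons_self)
    have hpass : ∀ (t : List String) (r : Int × String),
        (∀ x : String, PySem.Dict.get? pvTable x = some r ↔ x ∈ t) → p ∈ t →
        (PySem.Set.issubset (PySem.Set.ofList (p :: rest)) t = true ↔
          ∀ x ∈ rest, PySem.Dict.get? pvTable x = some r) := by
      intro t r hgrp hp
      rw [hsub t]
      constructor
      · intro h x hx; exact (hgrp x).mpr (h x (List.mem_cons_of_mem _ hx))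
      · intro h x hx
        rcases List.mem_cons.mp hx with rfl | hx
        · exact hp
        · exact (hgrp x).mp (h x hx)
    have hgw : ∀ x : String, PySem.Dict.get? pvTable x = some (297, "wards") ↔
        x ∈ (["E05", "W05"] : List String) := by
      intro x; rw [pvLookup_eq]
      split_ifs with h1 h2 h3 h4
      · simp_all
      · rcases h2 with rfl | rfl <;> simp
      · rcases h3 with rfl | rfl <;> simp
      · rcases h4 with rfl | rfl <;> simp
      · simp_all
    have hgo : ∀ x : String, PySem.Dict.get? pvTable x = some (300, "output areas") ↔
        x ∈ (["E00", "W00"] : List String) := by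
      intro x; rw [pvLookup_eq]
      split_ifs with h1 h2 h3 h4
      · rcases h1 with rfl | rfl <;> simp
      · simp_all
      · rcases h3 with rfl | rfl <;> simp
      · rcases h4 with rfl | rfl <;> simp
      · simp_all
    have hgl : ∀ x : String, PySem.Dict.get? pvTable x = some (298, "lsoa") ↔
        x ∈ (["E01", "W01"] : List String) := by
      intro x; rw [pvLookup_eq]
      split_ifs with h1 h2 h3 h4
      · rcases h1 with rfl | rfl <;> simp
      · rcases h2 with rfl | rfl <;> simp
      · simp_all
      · rcases h4 with rfl | rfl <;> simp
      · simp_all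
    have hgm : ∀ x : String, PySem.Dict.get? pvTable x = some (299, "msoa") ↔
        x ∈ (["E02", "W02"] : List String) := by
      intro x; rw [pvLookup_eq]
      split_ifs with h1 h2 h3 h4
      · rcases h1 with rfl | rfl <;> simp
      · rcases h2 with rfl | rfl <;> simp
      · rcases h3 with rfl | rfl <;> simp
      · simp_all
      · simp_all
    rw [if_neg hne]
    by_cases h05 : p = "E05" ∨ p = "W05"
    · have hp : p ∈ (["E05", "W05"] : List String) := by rcases h05 with rfl | rfl <;> simp
      have hlook : PySem.Dict.get? pvTable p = some (297, "wards") := (hgw p).mpr hp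
      have hRHS : pvPreLoop (p :: rest) none =
          if ∀ x ∈ rest, PySem.Dict.get? pvTable x = some (297, "wards")
          then some (297, "wards") else none := by
        rw [pvPreLoop, hlook]; exact pvPreLoop_some rest _
      rw [hRHS]
      by_cases hall : ∀ x ∈ rest, PySem.Dict.get? pvTable x = some (297, "wards")
      · rw [if_pos ((hpass _ _ hgw hp).mpr hall), if_pos hall]
      · rw [if_neg (fun hc => hall ((hpass _ _ hgw hp).mp hc)), if_neg hall,
          if_neg (by rw [hfail _ (by rcases h05 with rfl | rfl <;> decide)]; exact Bool.false_ne_true),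
          if_neg (by rw [hfail _ (by rcases h05 with rfl | rfl <;> decide)]; exact Bool.false_ne_true),
          if_neg (by rw [hfail _ (by rcases h05 with rfl | rfl <;> decide)]; exact Bool.false_ne_true)]
    · by_cases h00 : p = "E00" ∨ p = "W00"
      · have hp : p ∈ (["E00", "W00"] : List String) := by rcases h00 with rfl | rfl <;> simp
        have hlook : PySem.Dict.get? pvTable p = some (300, "output areas") := (hgo p).mpr hp
        have hRHS : pvPreLoop (p :: rest) none =
            if ∀ x ∈ rest, PySem.Dict.get? pvTable x = some (300, "output areas")
            then some (300, "output areas") else none := by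
          rw [pvPreLoop, hlook]; exact pvPreLoop_some rest _
        rw [hRHS,
          if_neg (by rw [hfail _ (by rcases h00 with rfl | rfl <;> decide)]; exact Bool.false_ne_true)]
        by_cases hall : ∀ x ∈ rest, PySem.Dict.get? pvTable x = some (300, "output areas")
        · rw [if_pos ((hpass _ _ hgo hp).mpr hall), if_pos hall]
        · rw [if_neg (fun hc => hall ((hpass _ _ hgo hp).mp hc)), if_neg hall,
            if_neg (by rw [hfail _ (by rcases h00 with rfl | rfl <;> decide)]; exact Bool.false_ne_true),
            if_neg (by rw [hfail _ (by rcases h00 with rfl | rfl <;> decide)]; exact Bool.false_ne_true)]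
      · by_cases h01 : p = "E01" ∨ p = "W01"
        · have hp : p ∈ (["E01", "W01"] : List String) := by rcases h01 with rfl | rfl <;> simp
          have hlook : PySem.Dict.get? pvTable p = some (298, "lsoa") := (hgl p).mpr hp
          have hRHS : pvPreLoop (p :: rest) none =
              if ∀ x ∈ rest, PySem.Dict.get? pvTable x = some (298, "lsoa")
              then some (298, "lsoa") else none := by
            rw [pvPreLoop, hlook]; exact pvPreLoop_some rest _
          rw [hRHS,
            if_neg (by rw [hfail _ (by rcases h01 with rfl | rfl <;> decide)]; exact Bool.false_ne_true),
            if_neg (by rw [hfail _ (by rcases h01 with rfl | rfl <;> decide)]; exact Bool.false_ne_true)]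
          by_cases hall : ∀ x ∈ rest, PySem.Dict.get? pvTable x = some (298, "lsoa")
          · rw [if_pos ((hpass _ _ hgl hp).mpr hall), if_pos hall]
          · rw [if_neg (fun hc => hall ((hpass _ _ hgl hp).mp hc)), if_neg hall,
              if_neg (by rw [hfail _ (by rcases h01 with rfl | rfl <;> decide)]; exact Bool.false_ne_true)]
        · by_cases h02 : p = "E02" ∨ p = "W02"
          · have hp : p ∈ (["E02", "W02"] : List String) := by rcases h02 with rfl | rfl <;> simp
            have hlook : PySem.Dict.get? pvTable p = some (299, "msoa") := (hgm p).mpr hp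
            have hRHS : pvPreLoop (p :: rest) none =
                if ∀ x ∈ rest, PySem.Dict.get? pvTable x = some (299, "msoa")
                then some (299, "msoa") else none := by
              rw [pvPreLoop, hlook]; exact pvPreLoop_some rest _
            rw [hRHS,
              if_neg (by rw [hfail _ (by rcases h02 with rfl | rfl <;> decide)]; exact Bool.false_ne_true),
              if_neg (by rw [hfail _ (by rcases h02 with rfl | rfl <;> decide)]; exact Bool.false_ne_true),
              if_neg (by rw [hfail _ (by rcases h02 with rfl | rfl <;> decide)]; exact Bool.false_ne_true)]
            by_cases hall : ∀ x ∈ rest, PySem.Dict.get? pvTable x = some (299, "msoa")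
            · rw [if_pos ((hpass _ _ hgm hp).mpr hall), if_pos hall]
            · rw [if_neg (fun hc => hall ((hpass _ _ hgm hp).mp hc)), if_neg hall]
          · have hlook : PySem.Dict.get? pvTable p = none := by
              rw [pvLookup_eq, if_neg h05, if_neg h00, if_neg h01, if_neg h02]
            have hRHS : pvPreLoop (p :: rest) none = none := by rw [pvPreLoop, hlook]
            have hnm : ∀ (t : List String), (∀ x ∈ t, x = "E05" ∨ x = "W05" ∨ x = "E00" ∨ x = "W00" ∨
                x = "E01" ∨ x = "W01" ∨ x = "E02" ∨ x = "W02") → p ∉ t := by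
              intro t ht hpt
              rcases ht p hpt with h | h | h | h | h | h | h | h
              · exact h05 (Or.inl h)
              · exact h05 (Or.inr h)
              · exact h00 (Or.inl h)
              · exact h00 (Or.inr h)
              · exact h01 (Or.inl h)
              · exact h01 (Or.inr h)
              · exact h02 (Or.inl h)
              · exact h02 (Or.inr h)
            rw [hRHS,
              if_neg (by rw [hfail _ (hnm _ (by intro x hx; fin_cases hx <;> simp))]; exact Bool.false_ne_true),
              if_neg (by rw [hfail _ (hnm _ (by intro x hx; fin_cases hx <;> simp))]; exact Bool.false_ne_true),
              if_neg (by rw [hfail _ (hnm _ (by intro x hx; fin_cases hx <;> simp))]; exact Bool.false_ne_true),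
              if_neg (by rw [hfail _ (hnm _ (by intro x hx; fin_cases hx <;> simp))]; exact Bool.false_ne_true)]

-- ===== VERDICT (by name: the statement is the Claim_ definition above) =====
theorem resolve_gss_geography_type_py_spec : Claim_equal_resolve_gss_geography_type_py := by
  intro gss_codes _
  unfold Spec_resolve_gss_geography_type_py resolve_gss_geography_type_py resolve_gss_geography_type_py_alt
  rw [pvAltLoop_eq, ← classify_eq]
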